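-- pv_equiv track=rewrite | github.com/sandialabs/pyGSTi | packages/pygsti/tools/mpitools.py | distribute_indices_base
-- ===== SOURCE A (Python) =====
-- def distribute_indices_base(indices, nprocs, rank, allow_split_comm=True):
--     """ TODO: docstring """
--     nIndices = len(indices)
--     if nIndices == 0: # special case when == 0
--         return [], {}
--
--     if nprocs >= nIndices:
--         if allow_split_comm:
--             nloc_std =  nprocs // nIndices
--             extra = nprocs - nloc_std*nIndices # extra procs
--             if rank < extra*(nloc_std+1):
--                 loc_indices = [ indices[rank // (nloc_std+1)] ]
--             else:
--                 loc_indices = [ indices[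
--                         extra + (rank-extra*(nloc_std+1)) // nloc_std ] ]
--
--             # owners dict gives rank of first (chief) processor for each index
--             # (the "owner" of a given index is responsible for communicating
--             #  results for that index to the other processors)
--             owners = { indices[i]: i*(nloc_std+1) for i in range(extra) }
--             owners.update( { indices[i]: extra*(nloc_std+1) + (i-extra)*nloc_std
--                              for i in range(extra, nIndices) } )
--         else:
--             #Not allowed to assign multiple procs the same local index
--             # (presumably b/c there is no way to sub-divide the work
--             #  performed for a single index among multiple procs)
--             if rank < nIndices:
--                 loc_indices = [ indices[rank] ]
--             else:
--                 loc_indices = [ ] #extra procs do nothing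
--             owners = { indices[i]: i for i in range(nIndices) }
--
--     else:
--         nloc_std =  nIndices // nprocs
--         extra = nIndices - nloc_std*nprocs # extra indices
--           # so assign (nloc_std+1) indices to first extra procs
--         if rank < extra:
--             nloc = nloc_std+1
--             nstart = rank * (nloc_std+1)
--             loc_indices = [ indices[rank // (nloc_std+1)] ]
--         else:
--             nloc = nloc_std
--             nstart = extra * (nloc_std+1) + (rank-extra)*nloc_std
--         loc_indices = [ indices[i] for i in range(nstart,nstart+nloc)]
--
--         owners = { } #which rank "owns" each index
--         for r in range(extra):
--             nstart = r * (nloc_std+1)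
--             for i in range(nstart,nstart+(nloc_std+1)):
--                 owners[indices[i]] = r
--         for r in range(extra,nprocs):
--             nstart = extra * (nloc_std+1) + (r-extra)*nloc_std
--             for i in range(nstart,nstart+nloc_std):
--                 owners[indices[i]] = r
--
--     return loc_indices, owners
-- ===== SOURCE B (Python) =====
-- def distribute_indices_base(indices, nprocs, rank, allow_split_comm=True):
--     # Per-index owner formula: one pass over positions; a position's owner (and, in the
--     # split case, its rank block) is computed in closed form, replacing A's per-rank loops.
--     n = len(indices)
--     if n == 0:
--         return [], {}
--     if nprocs >= n:
--         if allow_split_comm: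
--             q, extra = divmod(nprocs, n)
--             def start(i):  # first rank assigned to position i
--                 return i * (q + 1) if i < extra else extra * (q + 1) + (i - extra) * q
--             def width(i):  # number of ranks assigned to position i
--                 return q + 1 if i < extra else q
--             loc_indices = [indices[i] for i in range(n)
--                            if start(i) <= rank < start(i) + width(i)]
--             owners = {indices[i]: start(i) for i in range(n)}
--         else:
--             loc_indices = [indices[i] for i in range(n) if i == rank]
--             owners = {indices[i]: i for i in range(n)}
--     else:
--         q, extra = divmod(n, nprocs)
--         def owner(i):  # rank owning position i
--             return i // (q + 1) if i < extra * (q + 1) else extra + (i - extra * (q + 1)) // q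
--         loc_indices = [indices[i] for i in range(n) if owner(i) == rank]
--         owners = {indices[i]: owner(i) for i in range(n)}
--     return loc_indices, owners
-- ===== Notes on version B (the rewrite author's own statement) =====
-- stated objective: alternative
-- what changed: B replaces A's per-rank closed-form/loop mixture (outer loops over ranks with inner index loops, plus two dict comprehensions) by one closed-form per-position owner/block formula and a single pass over positions that builds both loc_indices (filter by block membership) and the owners dict.
-- outside the precondition, e.g. on distribute_indices_base([5, 6], 3, -1, True): A returns ([6], {5: 0, 6: 2}), B returns ([], {5: 0, 6: 2}); on distribute_indices_base([5, 6], 5, 9, True): A raises IndexError, B returns ([], {5: 0, 6: 3})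
import Mathlib
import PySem

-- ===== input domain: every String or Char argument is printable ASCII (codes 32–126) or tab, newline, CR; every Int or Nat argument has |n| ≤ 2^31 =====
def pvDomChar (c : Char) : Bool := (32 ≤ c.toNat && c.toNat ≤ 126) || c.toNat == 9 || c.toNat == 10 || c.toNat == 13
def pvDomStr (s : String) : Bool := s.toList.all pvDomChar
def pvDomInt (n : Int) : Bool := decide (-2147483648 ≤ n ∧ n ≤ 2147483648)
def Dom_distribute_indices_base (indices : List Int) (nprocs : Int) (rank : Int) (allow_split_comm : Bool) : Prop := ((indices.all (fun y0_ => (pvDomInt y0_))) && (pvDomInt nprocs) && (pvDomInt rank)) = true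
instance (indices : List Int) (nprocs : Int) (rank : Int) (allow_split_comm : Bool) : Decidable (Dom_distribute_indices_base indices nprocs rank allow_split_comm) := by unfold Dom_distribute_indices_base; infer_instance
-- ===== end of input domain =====

-- B replaces A's per-rank loops by a closed-form per-position owner/block formula and builds
-- loc_indices and owners in one pass over the positions (objective: alternative decomposition).

-- ===== PORT A =====
def distribute_indices_base (indices : List Int) (nprocs : Int) (rank : Int) (allow_split_comm : Bool) : List Int × (List (Int × Int)) :=
  let nIndices : Int := indices.length
  if nIndices = 0 then ([], [])
  else if nIndices ≤ nprocs then
    if allow_split_comm then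
      let nloc_std := PySem.Int.floordiv nprocs nIndices
      let extra := nprocs - nloc_std * nIndices
      let loc_indices :=
        if rank < extra * (nloc_std + 1) then
          [PySem.List.pyGetD indices (PySem.Int.floordiv rank (nloc_std + 1)) 0]
        else
          [PySem.List.pyGetD indices (extra + PySem.Int.floordiv (rank - extra * (nloc_std + 1)) nloc_std) 0]
      let owners := (PySem.List.pyRange 0 extra 1).foldl
        (fun d i => d.insert (PySem.List.pyGetD indices i 0) (i * (nloc_std + 1))) PySem.Dict.empty
      let owners := (PySem.List.pyRange extra nIndices 1).foldl
        (fun d i => d.insert (PySem.List.pyGetD indices i 0) (extra * (nloc_std + 1) + (i - extra) * nloc_std)) owners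
      (loc_indices, owners.items)
    else
      let loc_indices := if rank < nIndices then [PySem.List.pyGetD indices rank 0] else []
      let owners := (PySem.List.pyRange 0 nIndices 1).foldl
        (fun d i => d.insert (PySem.List.pyGetD indices i 0) i) PySem.Dict.empty
      (loc_indices, owners.items)
  else
    let nloc_std := PySem.Int.floordiv nIndices nprocs
    let extra := nIndices - nloc_std * nprocs
    let nl_ns : Int × Int :=
      if rank < extra then
        -- Python assigns loc_indices here too; it is dead code, overwritten just below.
        let _dead := [PySem.List.pyGetD indices (PySem.Int.floordiv rank (nloc_std + 1)) 0]
        (nloc_std + 1, rank * (nloc_std + 1))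
      else (nloc_std, extra * (nloc_std + 1) + (rank - extra) * nloc_std)
    let loc_indices := (PySem.List.pyRange nl_ns.2 (nl_ns.2 + nl_ns.1) 1).map
      (fun i => PySem.List.pyGetD indices i 0)
    let owners := (PySem.List.pyRange 0 extra 1).foldl
      (fun d r => (PySem.List.pyRange (r * (nloc_std + 1)) (r * (nloc_std + 1) + (nloc_std + 1)) 1).foldl
        (fun d i => d.insert (PySem.List.pyGetD indices i 0) r) d) PySem.Dict.empty
    let owners := (PySem.List.pyRange extra nprocs 1).foldl
      (fun d r => (PySem.List.pyRange (extra * (nloc_std + 1) + (r - extra) * nloc_std)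
          (extra * (nloc_std + 1) + (r - extra) * nloc_std + nloc_std) 1).foldl
        (fun d i => d.insert (PySem.List.pyGetD indices i 0) r) d) owners
    (loc_indices, owners.items)

-- ===== PORT B =====
def distribute_indices_base_alt (indices : List Int) (nprocs : Int) (rank : Int) (allow_split_comm : Bool) : List Int × (List (Int × Int)) :=
  let n : Int := indices.length
  if n = 0 then ([], [])
  else if n ≤ nprocs then
    if allow_split_comm then
      let q := PySem.Int.floordiv nprocs n
      let extra := PySem.Int.mod nprocs n
      let start := fun (i : Int) => if i < extra then i * (q + 1) else extra * (q + 1) + (i - extra) * q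
      let width := fun (i : Int) => if i < extra then q + 1 else q
      let loc_indices := ((PySem.List.pyRange 0 n 1).filter
          (fun i => decide (start i ≤ rank ∧ rank < start i + width i))).map
        (fun i => PySem.List.pyGetD indices i 0)
      let owners := (PySem.List.pyRange 0 n 1).foldl
        (fun d i => d.insert (PySem.List.pyGetD indices i 0) (start i)) PySem.Dict.empty
      (loc_indices, owners.items)
    else
      let loc_indices := ((PySem.List.pyRange 0 n 1).filter (fun i => i == rank)).map
        (fun i => PySem.List.pyGetD indices i 0)
      let owners := (PySem.List.pyRange 0 n 1).foldl
        (fun d i => d.insert (PySem.List.pyGetD indices i 0) i) PySem.Dict.empty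
      (loc_indices, owners.items)
  else
    let q := PySem.Int.floordiv n nprocs
    let extra := PySem.Int.mod n nprocs
    let owner := fun (i : Int) =>
      if i < extra * (q + 1) then PySem.Int.floordiv i (q + 1)
      else extra + PySem.Int.floordiv (i - extra * (q + 1)) q
    let loc_indices := ((PySem.List.pyRange 0 n 1).filter (fun i => owner i == rank)).map
      (fun i => PySem.List.pyGetD indices i 0)
    let owners := (PySem.List.pyRange 0 n 1).foldl
      (fun d i => d.insert (PySem.List.pyGetD indices i 0) (owner i)) PySem.Dict.empty
    (loc_indices, owners.items)

-- ===== PRECONDITION & SPEC =====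
-- Pre_ restricts (nonempty-indices) inputs to the natural MPI domain 0 ≤ rank < nprocs — plus any
-- nonnegative rank when allow_split_comm is false and nprocs ≥ len(indices), where extra ranks idle;
-- outside it A either raises IndexError or returns accidental values via Python negative-index wraparound.
def Pre_distribute_indices_base (indices : List Int) (nprocs : Int) (rank : Int) (allow_split_comm : Bool) : Prop :=
  indices = [] ∨ (0 ≤ rank ∧ (rank < nprocs ∨ (allow_split_comm = false ∧ (indices.length : Int) ≤ nprocs)))
instance (indices : List Int) (nprocs : Int) (rank : Int) (allow_split_comm : Bool) : Decidable (Pre_distribute_indices_base indices nprocs rank allow_split_comm) := by unfold Pre_distribute_indices_base; infer_instance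
def pvWitness_distribute_indices_base : List Int × Int × Int × Bool := ([7, 3, 5], 2, 1, true)

def Spec_distribute_indices_base (indices : List Int) (nprocs : Int) (rank : Int) (allow_split_comm : Bool) (out : List Int × (List (Int × Int))) : Prop := out = distribute_indices_base_alt indices nprocs rank allow_split_comm
instance (indices : List Int) (nprocs : Int) (rank : Int) (allow_split_comm : Bool) (out : List Int × (List (Int × Int))) : Decidable (Spec_distribute_indices_base indices nprocs rank allow_split_comm out) := by unfold Spec_distribute_indices_base; infer_instance

-- ===== CLAIM (what is proved, stated in full; the proofs are below) =====
def Claim_equal_distribute_indices_base : Prop := ∀ (indices : List Int) (nprocs : Int) (rank : Int) (allow_split_comm : Bool), Dom_distribute_indices_base indices nprocs rank allow_split_comm → Pre_distribute_indices_base indices nprocs rank allow_split_comm → Spec_distribute_indices_base indices nprocs rank allow_split_comm (distribute_indices_base indices nprocs rank allow_split_comm)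


-- ===== LEMMAS AND PROOFS =====

-- Block geometry shared by both block layouts: `e` blocks of size q+1 followed by blocks of
-- size q. pvSt q e k = first element of block k; pvSz = its size; pvPos = block containing x.
def pvSt (q e k : Int) : Int := if k < e then k * (q + 1) else e * (q + 1) + (k - e) * q
def pvSz (q e k : Int) : Int := if k < e then q + 1 else q
def pvPos (q e x : Int) : Int :=
  if x < e * (q + 1) then PySem.Int.floordiv x (q + 1)
  else e + PySem.Int.floordiv (x - e * (q + 1)) q

theorem pvSt_zero (q e : Int) (he : 0 ≤ e) : pvSt q e 0 = 0 := by
  unfold pvSt; split_ifs with h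
  · ring
  · have : e = 0 := by omega
    subst this; ring

theorem pvSt_succ {q e : Int} (k : Int) (he : 0 ≤ e) : pvSt q e (k + 1) = pvSt q e k + pvSz q e k := by
  unfold pvSt pvSz; split_ifs with h1 h2 h2
  · ring
  · omega
  · have : e = k + 1 := by omega
    subst this; ring
  · ring

theorem pvSt_mono {q e a b : Int} (hq : 1 ≤ q) (he : 0 ≤ e) (hab : a ≤ b) :
    pvSt q e a ≤ pvSt q e b := by
  unfold pvSt; split_ifs with h1 h2 h2
  · have := mul_le_mul_of_nonneg_right hab (show (0:Int) ≤ q + 1 by omega)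
    linarith
  · have h3 : a * (q + 1) ≤ e * (q + 1) :=
      mul_le_mul_of_nonneg_right (by omega) (by omega)
    have h4 : (0:Int) ≤ (b - e) * q := mul_nonneg (by omega) (by omega)
    linarith
  · omega
  · have := mul_le_mul_of_nonneg_right (show a - e ≤ b - e by omega) (show (0:Int) ≤ q by omega)
    linarith

theorem pvPos_eq {q e k x : Int} (hq : 1 ≤ q) (he : 0 ≤ e) (hk : 0 ≤ k)
    (h1 : pvSt q e k ≤ x) (h2 : x < pvSt q e k + pvSz q e k) : pvPos q e x = k := by
  simp only [pvSt, pvSz] at h1 h2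
  unfold pvPos
  by_cases hk' : k < e
  · simp only [if_pos hk'] at h1 h2
    have hr : (k + 1) * (q + 1) = k * (q + 1) + (q + 1) := by ring
    have hA : (k + 1) * (q + 1) ≤ e * (q + 1) :=
      mul_le_mul_of_nonneg_right (by omega) (by omega)
    rw [if_pos (show x < e * (q + 1) by linarith)]
    rw [PySem.Int.floordiv_eq_iff_of_pos (by omega)]
    constructor
    · linarith
    · linarith
  · simp only [if_neg hk'] at h1 h2
    have h0 : (0:Int) ≤ (k - e) * q := mul_nonneg (by omega) (by omega)
    rw [if_neg (show ¬ x < e * (q + 1) by push_neg; linarith)]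
    have : PySem.Int.floordiv (x - e * (q + 1)) q = k - e := by
      rw [PySem.Int.floordiv_eq_iff_of_pos (by omega)]
      have hr : (k - e + 1) * q = (k - e) * q + q := by ring
      constructor
      · linarith
      · linarith
    omega

theorem pvPos_block {q e x : Int} (hq : 1 ≤ q) (he : 0 ≤ e) (hx : 0 ≤ x) :
    0 ≤ pvPos q e x ∧ pvSt q e (pvPos q e x) ≤ x ∧
      x < pvSt q e (pvPos q e x) + pvSz q e (pvPos q e x) := by
  unfold pvPos
  by_cases hx' : x < e * (q + 1)
  · rw [if_pos hx']
    have hp0 : 0 ≤ PySem.Int.floordiv x (q + 1) := by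
      rw [PySem.Int.le_floordiv_iff_mul_le (by omega)]; linarith
    have hpe : PySem.Int.floordiv x (q + 1) < e := by
      rw [PySem.Int.floordiv_lt_iff_lt_mul (by omega)]; exact hx'
    have hle : PySem.Int.floordiv x (q + 1) * (q + 1) ≤ x := by
      rw [← PySem.Int.le_floordiv_iff_mul_le (by omega)]
    have hlt : x < (PySem.Int.floordiv x (q + 1) + 1) * (q + 1) := by
      rw [← PySem.Int.floordiv_lt_iff_lt_mul (by omega)]; omega
    refine ⟨hp0, ?_, ?_⟩ <;> simp only [pvSt, pvSz] <;> simp only [if_pos hpe]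
    · exact hle
    · linarith [show (PySem.Int.floordiv x (q+1) + 1) * (q + 1) = PySem.Int.floordiv x (q+1) * (q + 1) + (q + 1) from by ring]
  · rw [if_neg hx']
    push_neg at hx'
    have hy : 0 ≤ x - e * (q + 1) := by linarith
    have hf0 : 0 ≤ PySem.Int.floordiv (x - e * (q + 1)) q := by
      rw [PySem.Int.le_floordiv_iff_mul_le (by omega)]; linarith
    have hle : PySem.Int.floordiv (x - e * (q + 1)) q * q ≤ x - e * (q + 1) := by
      rw [← PySem.Int.le_floordiv_iff_mul_le (by omega)]
    have hlt : x - e * (q + 1) < (PySem.Int.floordiv (x - e * (q + 1)) q + 1) * q := by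
      rw [← PySem.Int.floordiv_lt_iff_lt_mul (by omega)]; omega
    refine ⟨by omega, ?_, ?_⟩ <;> simp only [pvSt, pvSz] <;>
      simp only [if_neg (show ¬ e + PySem.Int.floordiv (x - e * (q + 1)) q < e by omega)]
    · have : (e + PySem.Int.floordiv (x - e * (q + 1)) q - e) = PySem.Int.floordiv (x - e * (q + 1)) q := by ring
      rw [this]; linarith
    · have : (e + PySem.Int.floordiv (x - e * (q + 1)) q - e) = PySem.Int.floordiv (x - e * (q + 1)) q := by ring
      rw [this]
      linarith [show (PySem.Int.floordiv (x - e*(q+1)) q + 1) * q = PySem.Int.floordiv (x - e*(q+1)) q * q + q from by ring]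

theorem pvPos_lt {q e K x : Int} (hq : 1 ≤ q) (he : 0 ≤ e) (hx : 0 ≤ x)
    (hK : x < pvSt q e K) : pvPos q e x < K := by
  by_contra h
  have h1 := (pvPos_block (q := q) (e := e) (x := x) hq he hx).2.1
  have h2 := pvSt_mono (q := q) (e := e) (a := K) (b := pvPos q e x) hq he (by omega)
  omega

theorem filter_block {q e K x : Int} (hq : 1 ≤ q) (he : 0 ≤ e) (hx : 0 ≤ x)
    (hK : x < pvSt q e K) :
    (PySem.List.pyRange 0 K 1).filter
        (fun i => decide ((if i < e then i * (q + 1) else e * (q + 1) + (i - e) * q) ≤ x ∧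
          x < (if i < e then i * (q + 1) else e * (q + 1) + (i - e) * q) + (if i < e then q + 1 else q)))
      = [pvPos q e x] := by
  obtain ⟨hp0, hb1, hb2⟩ := pvPos_block (q := q) (e := e) (x := x) hq he hx
  have hplt : pvPos q e x < K := pvPos_lt hq he hx hK
  have hcongr : ∀ i ∈ PySem.List.pyRange 0 K 1,
      (decide ((if i < e then i * (q + 1) else e * (q + 1) + (i - e) * q) ≤ x ∧
          x < (if i < e then i * (q + 1) else e * (q + 1) + (i - e) * q) + (if i < e then q + 1 else q)))
        = (i == pvPos q e x) := by
    intro i hi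
    rw [PySem.List.mem_pyRange_one] at hi
    rw [Bool.eq_iff_iff]
    simp only [decide_eq_true_eq, beq_iff_eq]
    constructor
    · intro hblk
      have := pvPos_eq (k := i) (x := x) hq he hi.1
        (by simpa only [pvSt] using hblk.1) (by simp only [pvSt, pvSz]; exact hblk.2)
      omega
    · intro hip
      subst hip
      simp only [pvSt, pvSz] at hb1 hb2
      exact ⟨hb1, hb2⟩
  rw [List.filter_congr hcongr, List.filter_beq]
  rw [List.count_eq_one_of_mem (PySem.List.nodup_pyRange_one 0 K)
    (PySem.List.mem_pyRange_one.mpr ⟨hp0, hplt⟩)]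
  rfl

theorem filter_owner {q e K x : Int} (hq : 1 ≤ q) (he : 0 ≤ e) (hx : 0 ≤ x) (hxK : x < K) :
    (PySem.List.pyRange 0 (pvSt q e K) 1).filter
        (fun i => (if i < e * (q + 1) then PySem.Int.floordiv i (q + 1)
          else e + PySem.Int.floordiv (i - e * (q + 1)) q) == x)
      = PySem.List.pyRange (pvSt q e x) (pvSt q e x + pvSz q e x) 1 := by
  have hfn : ∀ i : Int, (if i < e * (q + 1) then PySem.Int.floordiv i (q + 1)
      else e + PySem.Int.floordiv (i - e * (q + 1)) q) = pvPos q e i := fun i => rfl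
  have ha0 : 0 ≤ pvSt q e x := by
    have := pvSt_mono (q := q) (e := e) (a := 0) (b := x) hq he hx
    rw [pvSt_zero q e he] at this; exact this
  have hbN : pvSt q e x + pvSz q e x ≤ pvSt q e K := by
    rw [← pvSt_succ x he]
    exact pvSt_mono hq he (by omega)
  have hab : pvSt q e x ≤ pvSt q e x + pvSz q e x := by
    simp only [pvSz]; split_ifs <;> omega
  rw [PySem.List.pyRange_one_append 0 (pvSt q e x) (pvSt q e K) ha0 (le_trans hab hbN),
    PySem.List.pyRange_one_append (pvSt q e x) (pvSt q e x + pvSz q e x) (pvSt q e K) hab hbN,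
    List.filter_append, List.filter_append]
  have h1 : (PySem.List.pyRange 0 (pvSt q e x) 1).filter
      (fun i => (if i < e * (q + 1) then PySem.Int.floordiv i (q + 1)
        else e + PySem.Int.floordiv (i - e * (q + 1)) q) == x) = [] := by
    rw [List.filter_eq_nil_iff]
    intro i hi
    rw [PySem.List.mem_pyRange_one] at hi
    simp only [hfn, beq_iff_eq]
    intro hpi
    have := (pvPos_block (q := q) (e := e) (x := i) hq he hi.1).2.1
    rw [hpi] at this; omega
  have h2 : (PySem.List.pyRange (pvSt q e x) (pvSt q e x + pvSz q e x) 1).filter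
      (fun i => (if i < e * (q + 1) then PySem.Int.floordiv i (q + 1)
        else e + PySem.Int.floordiv (i - e * (q + 1)) q) == x)
      = PySem.List.pyRange (pvSt q e x) (pvSt q e x + pvSz q e x) 1 := by
    rw [List.filter_eq_self]
    intro i hi
    rw [PySem.List.mem_pyRange_one] at hi
    simp only [hfn, beq_iff_eq]
    exact pvPos_eq hq he hx hi.1 hi.2
  have h3 : (PySem.List.pyRange (pvSt q e x + pvSz q e x) (pvSt q e K) 1).filter
      (fun i => (if i < e * (q + 1) then PySem.Int.floordiv i (q + 1)
        else e + PySem.Int.floordiv (i - e * (q + 1)) q) == x) = [] := by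
    rw [List.filter_eq_nil_iff]
    intro i hi
    rw [PySem.List.mem_pyRange_one] at hi
    simp only [hfn, beq_iff_eq]
    intro hpi
    have hblk := (pvPos_block (q := q) (e := e) (x := i) hq he (by omega)).2.2
    rw [hpi] at hblk; omega
  rw [h1, h2, h3, List.nil_append, List.append_nil]

theorem nested_loop {κ : Type} [BEq κ] (g : Int → κ) (q e : Int) (hq : 1 ≤ q) (he : 0 ≤ e) :
    ∀ (t : Nat) (a : Int) (d : PySem.Dict κ Int), 0 ≤ a →
      (PySem.List.pyRange a (a + (t : Int)) 1).foldl
          (fun d r => (PySem.List.pyRange (pvSt q e r) (pvSt q e r + pvSz q e r) 1).foldl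
            (fun d i => d.insert (g i) r) d) d
        = (PySem.List.pyRange (pvSt q e a) (pvSt q e (a + (t : Int))) 1).foldl
            (fun d i => d.insert (g i) (pvPos q e i)) d := by
  intro t
  induction t with
  | zero =>
    intro a d _
    simp only [Nat.cast_zero, add_zero]
    rw [PySem.List.pyRange_one_eq_nil (le_refl a),
      PySem.List.pyRange_one_eq_nil (le_refl (pvSt q e a))]
    rfl
  | succ t ih =>
    intro a d ha
    have hcast : a + ((t + 1 : Nat) : Int) = (a + 1) + (t : Int) := by push_cast; ring
    rw [hcast]
    rw [PySem.List.pyRange_one_cons (show a < (a + 1) + (t : Int) by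
      have : (0:Int) ≤ (t : Int) := Int.natCast_nonneg t
      omega)]
    rw [List.foldl_cons]
    rw [ih (a + 1) _ (by omega)]
    have hm1 : pvSt q e a ≤ pvSt q e (a + 1) := pvSt_mono hq he (by omega)
    have hm2 : pvSt q e (a + 1) ≤ pvSt q e ((a + 1) + (t : Int)) := pvSt_mono hq he (by
      have : (0:Int) ≤ (t : Int) := Int.natCast_nonneg t
      omega)
    rw [PySem.List.pyRange_one_append (pvSt q e a) (pvSt q e (a + 1))
      (pvSt q e ((a + 1) + (t : Int))) hm1 hm2, List.foldl_append]
    have hinner : (PySem.List.pyRange (pvSt q e a) (pvSt q e a + pvSz q e a) 1).foldl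
        (fun d i => d.insert (g i) a) d
        = (PySem.List.pyRange (pvSt q e a) (pvSt q e (a + 1)) 1).foldl
          (fun d i => d.insert (g i) (pvPos q e i)) d := by
      rw [pvSt_succ a he]
      apply PySem.List.foldl_congr_mem
      intro acc i hi
      rw [PySem.List.mem_pyRange_one] at hi
      rw [pvPos_eq hq he ha hi.1 hi.2]
    rw [hinner]


theorem nested_loopI {κ : Type} [BEq κ] (g : Int → κ) (q e : Int) (hq : 1 ≤ q) (he : 0 ≤ e)
    (a b : Int) (d : PySem.Dict κ Int) (ha : 0 ≤ a) (hab : a ≤ b) :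
    (PySem.List.pyRange a b 1).foldl
        (fun d r => (PySem.List.pyRange (pvSt q e r) (pvSt q e r + pvSz q e r) 1).foldl
          (fun d i => d.insert (g i) r) d) d
      = (PySem.List.pyRange (pvSt q e a) (pvSt q e b) 1).foldl
          (fun d i => d.insert (g i) (pvPos q e i)) d := by
  obtain ⟨t, ht⟩ : ∃ t : Nat, b = a + (t : Int) := ⟨(b - a).toNat, by omega⟩
  subst ht
  exact nested_loop g q e hq he t a d ha

-- ===== VERDICT (by name: the statement is the Claim_ definition above) =====
theorem distribute_indices_base_spec : Claim_equal_distribute_indices_base := by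
  intro indices nprocs rank asc _hdom hpre
  unfold Spec_distribute_indices_base
  simp only [distribute_indices_base, distribute_indices_base_alt]
  by_cases hnil : indices = []
  · subst hnil; simp
  · have hn0 : 0 < indices.length := List.length_pos_iff.mpr hnil
    have hn1 : (1:Int) ≤ (indices.length : Int) := by exact_mod_cast hn0
    obtain ⟨hr0, hcase⟩ := hpre.resolve_left hnil
    rw [if_neg (show ¬ ((indices.length : Int) = 0) by omega),
        if_neg (show ¬ ((indices.length : Int) = 0) by omega)]
    by_cases hnp : (indices.length : Int) ≤ nprocs
    · rw [if_pos hnp, if_pos hnp]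
      have hqpos : (0:Int) < (indices.length : Int) := by omega
      cases asc with
      | true =>
        rw [if_pos rfl, if_pos rfl]
        have hq1 : 1 ≤ PySem.Int.floordiv nprocs (indices.length : Int) := by
          rw [PySem.Int.le_floordiv_iff_mul_le hqpos]; omega
        have hE : PySem.Int.mod nprocs (indices.length : Int)
            = nprocs - PySem.Int.floordiv nprocs (indices.length : Int) * (indices.length : Int) := by
          have h := PySem.Int.floordiv_mul_add_mod nprocs (indices.length : Int); linarith
        rw [hE]
        set q := PySem.Int.floordiv nprocs (indices.length : Int) with hqdef
        set e := nprocs - q * (indices.length : Int) with hedef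
        have he0 : 0 ≤ e := by
          have h := PySem.Int.mod_nonneg nprocs hqpos
          rw [hE] at h; exact h
        have helt : e < (indices.length : Int) := by
          have h := PySem.Int.mod_lt nprocs hqpos
          rw [hE] at h; exact h
        have hrn : rank < nprocs := by
          rcases hcase with h | h
          · exact h
          · cases h.1
        have hstn : pvSt q e (indices.length : Int) = nprocs := by
          unfold pvSt; rw [if_neg (by omega)]; rw [hedef]; ring
        have hfB := filter_block (q := q) (e := e) (K := (indices.length : Int)) (x := rank)
          hq1 he0 hr0 (by rw [hstn]; exact hrn)
        rw [hfB]
        have hlocA : (if rank < e * (q + 1) then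
              [PySem.List.pyGetD indices (PySem.Int.floordiv rank (q + 1)) 0]
            else [PySem.List.pyGetD indices (e + PySem.Int.floordiv (rank - e * (q + 1)) q) 0])
            = [PySem.List.pyGetD indices (pvPos q e rank) 0] := by
          unfold pvPos; split_ifs <;> rfl
        rw [hlocA]
        have hown : (PySem.List.pyRange e (indices.length : Int) 1).foldl
              (fun d i => d.insert (PySem.List.pyGetD indices i 0) (e * (q + 1) + (i - e) * q))
              ((PySem.List.pyRange 0 e 1).foldl
                (fun d i => d.insert (PySem.List.pyGetD indices i 0) (i * (q + 1))) PySem.Dict.empty)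
            = (PySem.List.pyRange 0 (indices.length : Int) 1).foldl
              (fun d i => d.insert (PySem.List.pyGetD indices i 0)
                (if i < e then i * (q + 1) else e * (q + 1) + (i - e) * q)) PySem.Dict.empty := by
          rw [PySem.List.pyRange_one_append 0 e (indices.length : Int) he0 (le_of_lt helt),
            List.foldl_append]
          have c1 : (PySem.List.pyRange 0 e 1).foldl
                (fun d i => d.insert (PySem.List.pyGetD indices i 0) (i * (q + 1))) PySem.Dict.empty
              = (PySem.List.pyRange 0 e 1).foldl
                (fun d i => d.insert (PySem.List.pyGetD indices i 0)
                  (if i < e then i * (q + 1) else e * (q + 1) + (i - e) * q)) PySem.Dict.empty := by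
            apply PySem.List.foldl_congr_mem
            intro acc i hi
            rw [PySem.List.mem_pyRange_one] at hi
            rw [if_pos hi.2]
          rw [← c1]
          apply PySem.List.foldl_congr_mem
          intro acc i hi
          rw [PySem.List.mem_pyRange_one] at hi
          rw [if_neg (by omega)]
        rw [hown]
        simp only [List.map_cons, List.map_nil]
      | false =>
        rw [if_neg (show ¬ (false = true) by decide), if_neg (show ¬ (false = true) by decide)]
        have hf : (PySem.List.pyRange 0 (indices.length : Int) 1).filter (fun i => i == rank)
            = if rank < (indices.length : Int) then [rank] else [] := by
          rw [List.filter_beq]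
          by_cases h : rank < (indices.length : Int)
          · rw [if_pos h, List.count_eq_one_of_mem (PySem.List.nodup_pyRange_one 0 _)
              (PySem.List.mem_pyRange_one.mpr ⟨hr0, h⟩)]
            rfl
          · rw [if_neg h, List.count_eq_zero_of_not_mem
              (fun hm => h (PySem.List.mem_pyRange_one.mp hm).2)]
            rfl
        rw [hf]
        split_ifs with h <;> rfl
    · rw [if_neg hnp, if_neg hnp]
      have hrn : rank < nprocs := by
        rcases hcase with h | h
        · exact h
        · exact absurd h.2 hnp
      have hp0 : (0:Int) < nprocs := by omega
      have hq1 : 1 ≤ PySem.Int.floordiv (indices.length : Int) nprocs := by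
        rw [PySem.Int.le_floordiv_iff_mul_le hp0]; omega
      have hE : PySem.Int.mod (indices.length : Int) nprocs
          = (indices.length : Int) - PySem.Int.floordiv (indices.length : Int) nprocs * nprocs := by
        have h := PySem.Int.floordiv_mul_add_mod (indices.length : Int) nprocs; linarith
      rw [hE]
      set q := PySem.Int.floordiv (indices.length : Int) nprocs with hqdef
      set e := (indices.length : Int) - q * nprocs with hedef
      have he0 : 0 ≤ e := by
        have h := PySem.Int.mod_nonneg (indices.length : Int) hp0
        rw [hE] at h; exact h
      have helt : e < nprocs := by
        have h := PySem.Int.mod_lt (indices.length : Int) hp0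
        rw [hE] at h; exact h
      have hstK : pvSt q e nprocs = (indices.length : Int) := by
        unfold pvSt; rw [if_neg (by omega)]; rw [hedef]; ring
      have hX : (if rank < e then ((q : Int) + 1, rank * (q + 1))
            else (q, e * (q + 1) + (rank - e) * q)) = (pvSz q e rank, pvSt q e rank) := by
        unfold pvSt pvSz; split_ifs <;> rfl
      rw [hX]
      dsimp only
      have hfB : (PySem.List.pyRange 0 (indices.length : Int) 1).filter
          (fun i => (if i < e * (q + 1) then PySem.Int.floordiv i (q + 1)
            else e + PySem.Int.floordiv (i - e * (q + 1)) q) == rank)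
          = PySem.List.pyRange (pvSt q e rank) (pvSt q e rank + pvSz q e rank) 1 := by
        rw [← hstK]
        exact filter_owner hq1 he0 hr0 hrn
      rw [hfB]
      have hst0 : 0 ≤ pvSt q e e := by
        have h := pvSt_mono (q := q) (e := e) (a := 0) (b := e) hq1 he0 he0
        rw [pvSt_zero q e he0] at h; exact h
      have hstm : pvSt q e e ≤ pvSt q e nprocs := pvSt_mono hq1 he0 (le_of_lt helt)
      have hown : (PySem.List.pyRange e nprocs 1).foldl
            (fun d r => (PySem.List.pyRange (e * (q + 1) + (r - e) * q)
                (e * (q + 1) + (r - e) * q + q) 1).foldl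
              (fun d i => d.insert (PySem.List.pyGetD indices i 0) r) d)
            ((PySem.List.pyRange 0 e 1).foldl
              (fun d r => (PySem.List.pyRange (r * (q + 1)) (r * (q + 1) + (q + 1)) 1).foldl
                (fun d i => d.insert (PySem.List.pyGetD indices i 0) r) d) PySem.Dict.empty)
          = (PySem.List.pyRange 0 (indices.length : Int) 1).foldl
            (fun d i => d.insert (PySem.List.pyGetD indices i 0)
              (if i < e * (q + 1) then PySem.Int.floordiv i (q + 1)
                else e + PySem.Int.floordiv (i - e * (q + 1)) q)) PySem.Dict.empty := by
        have h1 : (PySem.List.pyRange 0 e 1).foldl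
              (fun d r => (PySem.List.pyRange (r * (q + 1)) (r * (q + 1) + (q + 1)) 1).foldl
                (fun d i => d.insert (PySem.List.pyGetD indices i 0) r) d) PySem.Dict.empty
            = (PySem.List.pyRange 0 (pvSt q e e) 1).foldl
              (fun d i => d.insert (PySem.List.pyGetD indices i 0) (pvPos q e i)) PySem.Dict.empty := by
          have hst : (PySem.List.pyRange 0 e 1).foldl
                (fun d r => (PySem.List.pyRange (r * (q + 1)) (r * (q + 1) + (q + 1)) 1).foldl
                  (fun d i => d.insert (PySem.List.pyGetD indices i 0) r) d) PySem.Dict.empty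
              = (PySem.List.pyRange 0 e 1).foldl
                (fun d r => (PySem.List.pyRange (pvSt q e r) (pvSt q e r + pvSz q e r) 1).foldl
                  (fun d i => d.insert (PySem.List.pyGetD indices i 0) r) d) PySem.Dict.empty := by
            apply PySem.List.foldl_congr_mem
            intro acc r hr
            rw [PySem.List.mem_pyRange_one] at hr
            simp only [pvSt, pvSz, if_pos hr.2]
          rw [hst]
          have h := nested_loopI (fun i => PySem.List.pyGetD indices i 0) q e hq1 he0 0 e
            PySem.Dict.empty (le_refl 0) he0
          rw [pvSt_zero q e he0] at h
          exact h
        calc (PySem.List.pyRange e nprocs 1).foldl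
              (fun d r => (PySem.List.pyRange (e * (q + 1) + (r - e) * q)
                  (e * (q + 1) + (r - e) * q + q) 1).foldl
                (fun d i => d.insert (PySem.List.pyGetD indices i 0) r) d)
              ((PySem.List.pyRange 0 e 1).foldl
                (fun d r => (PySem.List.pyRange (r * (q + 1)) (r * (q + 1) + (q + 1)) 1).foldl
                  (fun d i => d.insert (PySem.List.pyGetD indices i 0) r) d) PySem.Dict.empty)
            = (PySem.List.pyRange e nprocs 1).foldl
              (fun d r => (PySem.List.pyRange (pvSt q e r) (pvSt q e r + pvSz q e r) 1).foldl
                (fun d i => d.insert (PySem.List.pyGetD indices i 0) r) d)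
              ((PySem.List.pyRange 0 e 1).foldl
                (fun d r => (PySem.List.pyRange (r * (q + 1)) (r * (q + 1) + (q + 1)) 1).foldl
                  (fun d i => d.insert (PySem.List.pyGetD indices i 0) r) d) PySem.Dict.empty) := by
              apply PySem.List.foldl_congr_mem
              intro acc r hr
              rw [PySem.List.mem_pyRange_one] at hr
              simp only [pvSt, pvSz, if_neg (show ¬ r < e by omega)]
          _ = (PySem.List.pyRange (pvSt q e e) (pvSt q e nprocs) 1).foldl
              (fun d i => d.insert (PySem.List.pyGetD indices i 0) (pvPos q e i))
              ((PySem.List.pyRange 0 e 1).foldl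
                (fun d r => (PySem.List.pyRange (r * (q + 1)) (r * (q + 1) + (q + 1)) 1).foldl
                  (fun d i => d.insert (PySem.List.pyGetD indices i 0) r) d) PySem.Dict.empty) :=
              nested_loopI (fun i => PySem.List.pyGetD indices i 0) q e hq1 he0 e nprocs _
                he0 (le_of_lt helt)
          _ = (PySem.List.pyRange (pvSt q e e) (pvSt q e nprocs) 1).foldl
              (fun d i => d.insert (PySem.List.pyGetD indices i 0) (pvPos q e i))
              ((PySem.List.pyRange 0 (pvSt q e e) 1).foldl
                (fun d i => d.insert (PySem.List.pyGetD indices i 0) (pvPos q e i))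
                PySem.Dict.empty) := by rw [h1]
          _ = (PySem.List.pyRange 0 (pvSt q e nprocs) 1).foldl
              (fun d i => d.insert (PySem.List.pyGetD indices i 0) (pvPos q e i))
              PySem.Dict.empty := by
              conv_rhs => rw [PySem.List.pyRange_one_append 0 (pvSt q e e) (pvSt q e nprocs)
                hst0 hstm, List.foldl_append]
          _ = (PySem.List.pyRange 0 (indices.length : Int) 1).foldl
              (fun d i => d.insert (PySem.List.pyGetD indices i 0)
                (if i < e * (q + 1) then PySem.Int.floordiv i (q + 1)
                  else e + PySem.Int.floordiv (i - e * (q + 1)) q)) PySem.Dict.empty := by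
              rw [hstK]; simp only [pvPos]
      rw [hown]
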